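-- pv_equiv track=rewrite | github.com/erjan/coding_exercises | check_if_string_is_decomposable_into_value_equal_substrings.py | isDecomposable
-- ===== SOURCE A (Python) =====
-- def isDecomposable(s: str) -> bool:
--     two_found = False
--     count = 1
--     for i, c in enumerate(s):
--         if i == len(s) - 1 or c != s[i+1]:
--             if count % 3:
--                 if count % 3 ==  1 or two_found:
--                     return False
--                 two_found = True
--
--             count = 0
--
--         count += 1
--
--     return two_found
-- ===== SOURCE B (Python) =====
-- def isDecomposable(s: str) -> bool:
--     # greedy parser: repeatedly consume a block of 3 equal chars, or (once) a block of 2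
--     pair_used = False
--     i = 0
--     n = len(s)
--     while i < n:
--         if i + 2 < n and s[i] == s[i + 1] == s[i + 2]:
--             i += 3
--         elif i + 1 < n and s[i] == s[i + 1] and not pair_used:
--             pair_used = True
--             i += 2
--         else:
--             return False
--     return pair_used
-- ===== Notes on version B (the rewrite author's own statement) =====
-- stated objective: alternative
-- what changed: B is a greedy parser that consumes the string block by block (a block of 3 equal chars, or once a block of 2), with no run-length counting and no mod-3 arithmetic, instead of A's per-character run-boundary scan with a running count checked modulo 3; advancing 3 chars per step instead of one enumerate iteration per char is also measurably faster.
import Mathlib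
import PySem

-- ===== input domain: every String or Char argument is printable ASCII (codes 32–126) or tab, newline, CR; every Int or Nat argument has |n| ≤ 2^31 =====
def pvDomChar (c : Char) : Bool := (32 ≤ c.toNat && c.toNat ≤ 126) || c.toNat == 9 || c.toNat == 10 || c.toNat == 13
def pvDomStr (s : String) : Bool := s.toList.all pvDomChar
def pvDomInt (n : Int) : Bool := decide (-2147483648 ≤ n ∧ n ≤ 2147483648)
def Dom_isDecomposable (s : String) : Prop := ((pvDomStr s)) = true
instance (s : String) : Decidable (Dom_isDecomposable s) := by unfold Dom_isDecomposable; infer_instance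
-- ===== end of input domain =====

-- B greedily consumes blocks of 3 equal chars (and at most one block of 2) instead of A's
-- run-boundary scan with a mod-3 count; objective: alternative. Proved equal on all inputs.


-- ===== PORT A =====
-- A's loop: at each char, i == len-1 becomes "tail is empty", c != s[i+1] becomes
-- "the next char (tail head) differs"; state (two_found, count) is carried, early 'return False' is a literal false.
def isDecomposableA_go : List Char → Bool → Nat → Bool
  | [], two_found, _ => two_found
  | c :: rest, two_found, count =>
    if rest.head? ≠ some c then          -- i == len(s)-1 (rest = []) or c != s[i+1]
      if count % 3 ≠ 0 then
        if count % 3 = 1 ∨ two_found then false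
        else isDecomposableA_go rest true 1      -- two_found := True; count := 0; count += 1
      else isDecomposableA_go rest two_found 1   -- count := 0; count += 1
    else isDecomposableA_go rest two_found (count + 1)

def isDecomposable (s : String) : Bool := isDecomposableA_go s.toList false 1

-- ===== PORT B =====
-- Source B's while loop over index i: the three suffix shapes at position i (≥3 chars left, exactly 2, ≤1)
-- become list patterns; the greedy branches consume 3 or 2 chars, 'return False' is a literal false.
def isDecomposableB_go : List Char → Bool → Bool
  | [], pair_used => pair_used
  | [_], _ => false
  | [c1, c2], pair_used =>
      if c1 = c2 ∧ pair_used = false then isDecomposableB_go [] true else false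
  | c1 :: c2 :: c3 :: rest, pair_used =>
      if c1 = c2 ∧ c2 = c3 then isDecomposableB_go rest pair_used
      else if c1 = c2 ∧ pair_used = false then isDecomposableB_go (c3 :: rest) true
      else false

def isDecomposable_alt (s : String) : Bool := isDecomposableB_go s.toList false

-- ===== PRECONDITION & SPEC =====
def Spec_isDecomposable (s : String) (out : Bool) : Prop := out = isDecomposable_alt s
instance (s : String) (out : Bool) : Decidable (Spec_isDecomposable s out) := by unfold Spec_isDecomposable; infer_instance

-- ===== CLAIM (what is proved, stated in full; the proofs are below) =====
def Claim_equal_isDecomposable : Prop := ∀ (s : String), Dom_isDecomposable s → Spec_isDecomposable s (isDecomposable s)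

-- ===== LEMMAS AND PROOFS =====

-- proof-only intermediate spec: the run lengths of the string and the mod-3 check over them;
-- both ports are proved equal to this.
def runLengths : List Char → List Nat
  | [] => []
  | c :: rest =>
      (1 + (rest.takeWhile (· = c)).length) :: runLengths (rest.dropWhile (· = c))
  termination_by l => l.length
  decreasing_by
    simpa using Nat.lt_succ_of_le (List.length_dropWhile_le _ rest)

def runCheck : List Nat → Bool → Bool
  | [], seen_two => seen_two
  | n :: rest, seen_two =>
    if n % 3 = 1 then false
    else if n % 3 = 2 then
      if seen_two then false else runCheck rest true
    else runCheck rest seen_two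

-- A's scan across one maximal run: starting at count = k on a list headed by c,
-- it consumes the whole run (total length k + takeWhile-length) and applies the boundary logic once.
theorem goA_run (rest : List Char) (c : Char) (tf : Bool) (k : Nat) :
    isDecomposableA_go (c :: rest) tf k =
      (if (k + (List.takeWhile (fun x => decide (x = c)) rest).length) % 3 = 1 then false
       else if (k + (List.takeWhile (fun x => decide (x = c)) rest).length) % 3 = 2 then
         (if tf then false
          else isDecomposableA_go (List.dropWhile (fun x => decide (x = c)) rest) true 1)
       else isDecomposableA_go (List.dropWhile (fun x => decide (x = c)) rest) tf 1) := by
  induction rest generalizing tf k with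
  | nil =>
      simp only [isDecomposableA_go, List.takeWhile_nil, List.dropWhile_nil,
        List.head?_nil, List.length_nil, Nat.add_zero]
      have h : k % 3 = 0 ∨ k % 3 = 1 ∨ k % 3 = 2 := by omega
      rcases h with h | h | h <;> simp [h]
  | cons d rest2 ih =>
      by_cases hd : d = c
      · subst hd
        have step : isDecomposableA_go (d :: d :: rest2) tf k
            = isDecomposableA_go (d :: rest2) tf (k + 1) := by
          simp [isDecomposableA_go]
        rw [step, ih]
        simp only [List.takeWhile_cons, List.dropWhile_cons, decide_true, if_true,
          List.length_cons]
        generalize (List.takeWhile (fun x => decide (x = d)) rest2).length = L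
        rw [show k + (L + 1) = k + 1 + L by omega]
      · have hne : ¬ (some d = some c) := by simpa using hd
        have hdd : (decide (d = c)) = false := by simpa using hd
        conv_lhs => rw [isDecomposableA_go]
        simp only [List.head?_cons, List.takeWhile_cons, List.dropWhile_cons,
          ne_eq, hne, not_false_eq_true, if_true, hdd, Bool.false_eq_true,
          if_false, List.length_nil, Nat.add_zero]
        have h : k % 3 = 0 ∨ k % 3 = 1 ∨ k % 3 = 2 := by omega
        rcases h with h | h | h <;> simp [h]

-- A's scan from a fresh run equals the mod-3 check on the run lengths
theorem goA_eq_runCheck (l : List Char) (tf : Bool) :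
    isDecomposableA_go l tf 1 = runCheck (runLengths l) tf := by
  induction l using runLengths.induct generalizing tf with
  | case1 => simp [isDecomposableA_go, runLengths, runCheck]
  | case2 c rest ih =>
      rw [goA_run, runLengths]
      simp only [runCheck]
      by_cases h1 : (1 + (List.takeWhile (fun x => decide (x = c)) rest).length) % 3 = 1
      · simp [h1]
      · by_cases h2 : (1 + (List.takeWhile (fun x => decide (x = c)) rest).length) % 3 = 2
        · simp only [h2, if_true]
          cases tf <;> simp [ih]
        · simp [ih]

-- B's greedy parse across one maximal run: it consumes the whole run via triples
-- (plus at most one pair) and the outcome depends only on the run length mod 3.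
theorem goB_run : ∀ (N : Nat) (rest : List Char), rest.length ≤ N → ∀ (c : Char) (p : Bool),
    isDecomposableB_go (c :: rest) p =
      (if (1 + (List.takeWhile (fun x => decide (x = c)) rest).length) % 3 = 1 then false
       else if (1 + (List.takeWhile (fun x => decide (x = c)) rest).length) % 3 = 2 then
         (if p then false
          else isDecomposableB_go (List.dropWhile (fun x => decide (x = c)) rest) true)
       else isDecomposableB_go (List.dropWhile (fun x => decide (x = c)) rest) p) := by
  intro N
  induction N with
  | zero =>
      intro rest h c p
      have : rest = [] := List.length_eq_zero_iff.mp (Nat.le_zero.mp h)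
      subst this
      simp [isDecomposableB_go]
  | succ N ih =>
      intro rest h c p
      cases rest with
      | nil => simp [isDecomposableB_go]
      | cons d rest2 =>
        by_cases hd : d = c
        · subst hd
          cases rest2 with
          | nil => cases p <;> simp [isDecomposableB_go]
          | cons e rest3 =>
            by_cases he : e = d
            · subst he
              have lhs : isDecomposableB_go (e :: e :: e :: rest3) p
                  = isDecomposableB_go rest3 p := by
                simp [isDecomposableB_go]
              rw [lhs]
              cases rest3 with
              | nil => simp [isDecomposableB_go]
              | cons f rest4 =>
                by_cases hf : f = e
                · subst hf
                  have h4 : rest4.length ≤ N := by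
                    simp only [List.length_cons] at h; omega
                  rw [ih rest4 h4 f p]
                  simp only [List.takeWhile_cons, List.dropWhile_cons, decide_true,
                    if_true, List.length_cons]
                  generalize (List.takeWhile (fun x => decide (x = f)) rest4).length = L
                  have e1 : (1 + (L + 1 + 1 + 1)) % 3 = (1 + L) % 3 := by omega
                  rw [e1]
                · have hff : (decide (f = e)) = false := by simpa using hf
                  simp [hff]
            · have hee : (decide (e = d)) = false := by simpa using he
              have he' : ¬ (d = e) := fun hde => he hde.symm
              cases p <;>
                simp [isDecomposableB_go, hee, he']
        · have hdd : (decide (d = c)) = false := by simpa using hd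
          have hd' : ¬ (c = d) := fun hcd => hd hcd.symm
          cases rest2 with
          | nil => simp [isDecomposableB_go, hdd, hd']
          | cons e rest3 => simp [isDecomposableB_go, hdd, hd']

-- B's greedy parse equals the mod-3 check on the run lengths
theorem goB_eq_runCheck (l : List Char) (p : Bool) :
    isDecomposableB_go l p = runCheck (runLengths l) p := by
  induction l using runLengths.induct generalizing p with
  | case1 => simp [isDecomposableB_go, runLengths, runCheck]
  | case2 c rest ih =>
      rw [goB_run rest.length rest le_rfl, runLengths]
      simp only [runCheck]
      by_cases h1 : (1 + (List.takeWhile (fun x => decide (x = c)) rest).length) % 3 = 1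
      · simp [h1]
      · by_cases h2 : (1 + (List.takeWhile (fun x => decide (x = c)) rest).length) % 3 = 2
        · simp only [h2, if_true]
          cases p <;> simp [ih]
        · simp [ih]

-- ===== VERDICT (by name: the statement is the Claim_ definition above) =====
theorem isDecomposable_spec : Claim_equal_isDecomposable := by
  intro s _
  unfold Spec_isDecomposable isDecomposable isDecomposable_alt
  rw [goA_eq_runCheck, goB_eq_runCheck]
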